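-- pv_equiv track=rewrite | github.com/pixelatedempathy/ai | archive/legacy_files/implementation/conversation_data_migrator.py | _suggest_branches
-- ===== SOURCE A (Python) =====
-- from typing import Dict, List, Any, Optional, Tuple
--
-- def _suggest_branches(user_message: str) -> List[str]:
--     """Suggest potential conversation branches based on user message"""
--     branches = []
--     msg_lower = user_message.lower()
--
--     # Work-related branches
--     if any(word in msg_lower for word in ['work', 'job', 'boss', 'office']):
--         branches.extend(['workplace_conflict', 'work_stress', 'career_anxiety'])
--
--     # Relationship branches
--     if any(word in msg_lower for word in ['relationship', 'partner', 'boyfriend', 'girlfriend']):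
--         branches.extend(['relationship_doubts', 'communication_issues', 'breakup_concerns'])
--
--     # Mental health branches
--     if any(word in msg_lower for word in ['anxious', 'depressed', 'stressed', 'overwhelmed']):
--         branches.extend(['anxiety_support', 'depression_help', 'stress_management'])
--
--     # Family branches
--     if any(word in msg_lower for word in ['family', 'parents', 'mom', 'dad', 'sibling']):
--         branches.extend(['family_conflict', 'parent_issues', 'family_dynamics'])
--
--     return branches[:3]  # Limit to 3 potential branches
-- ===== SOURCE B (Python) =====
-- # B: one ordered (keywords, branches) table with early return on the first matching
-- # category; each category contributes exactly 3 branches so the first match fully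
-- # determines A's branches[:3] result.
-- BRANCH_TABLE = [
--     (('work', 'job', 'boss', 'office'),
--      ('workplace_conflict', 'work_stress', 'career_anxiety')),
--     (('relationship', 'partner', 'boyfriend', 'girlfriend'),
--      ('relationship_doubts', 'communication_issues', 'breakup_concerns')),
--     (('anxious', 'depressed', 'stressed', 'overwhelmed'),
--      ('anxiety_support', 'depression_help', 'stress_management')),
--     (('family', 'parents', 'mom', 'dad', 'sibling'),
--      ('family_conflict', 'parent_issues', 'family_dynamics')),
-- ]
--
-- def _suggest_branches(user_message: str) -> list:
--     msg = user_message.lower()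
--     for keywords, branches in BRANCH_TABLE:
--         if any(k in msg for k in keywords):
--             return list(branches)
--     return []
-- ===== Notes on version B (the rewrite author's own statement) =====
-- stated objective: simpler
-- what changed: Replaces the four append-then-slice if-blocks by a single ordered (keywords, branches) table scanned with early return on the first matching category, which determines branches[:3] since every category adds exactly three branches.
import Mathlib
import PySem

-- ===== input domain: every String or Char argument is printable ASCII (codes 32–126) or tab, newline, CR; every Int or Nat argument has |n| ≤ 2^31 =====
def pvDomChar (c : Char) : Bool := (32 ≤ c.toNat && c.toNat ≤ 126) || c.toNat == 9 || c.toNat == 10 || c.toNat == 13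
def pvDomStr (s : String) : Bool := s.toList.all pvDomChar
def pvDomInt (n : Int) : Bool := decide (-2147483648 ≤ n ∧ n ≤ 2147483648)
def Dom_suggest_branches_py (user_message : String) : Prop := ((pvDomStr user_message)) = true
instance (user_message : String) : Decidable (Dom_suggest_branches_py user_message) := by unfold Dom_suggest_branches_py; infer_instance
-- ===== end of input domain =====

-- B replaces the four append-then-slice if-blocks by one ordered keyword/branch table
-- scanned with early return on the first matching category (objective: simpler).


-- ===== PORT A =====
def suggest_branches_py (user_message : String) : List String :=
  let branches : List String := []
  let msg_lower := PySem.Str.lower user_message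
  let branches :=
    if (["work", "job", "boss", "office"]).any (fun word => PySem.Str.isIn word msg_lower) then
      branches ++ ["workplace_conflict", "work_stress", "career_anxiety"] else branches
  let branches :=
    if (["relationship", "partner", "boyfriend", "girlfriend"]).any (fun word => PySem.Str.isIn word msg_lower) then
      branches ++ ["relationship_doubts", "communication_issues", "breakup_concerns"] else branches
  let branches :=
    if (["anxious", "depressed", "stressed", "overwhelmed"]).any (fun word => PySem.Str.isIn word msg_lower) then
      branches ++ ["anxiety_support", "depression_help", "stress_management"] else branches
  let branches :=
    if (["family", "parents", "mom", "dad", "sibling"]).any (fun word => PySem.Str.isIn word msg_lower) then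
      branches ++ ["family_conflict", "parent_issues", "family_dynamics"] else branches
  PySem.List.slice branches none (some 3)

-- ===== PORT B =====
def pvBranchTable : List (List String × List String) :=
  [ (["work", "job", "boss", "office"],
     ["workplace_conflict", "work_stress", "career_anxiety"]),
    (["relationship", "partner", "boyfriend", "girlfriend"],
     ["relationship_doubts", "communication_issues", "breakup_concerns"]),
    (["anxious", "depressed", "stressed", "overwhelmed"],
     ["anxiety_support", "depression_help", "stress_management"]),
    (["family", "parents", "mom", "dad", "sibling"],
     ["family_conflict", "parent_issues", "family_dynamics"]) ]

def pvScanTable (msg : String) : List (List String × List String) → List String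
  | [] => []
  | (keywords, branches) :: rest =>
      if keywords.any (fun k => PySem.Str.isIn k msg) then branches
      else pvScanTable msg rest

def suggest_branches_py_alt (user_message : String) : List String :=
  pvScanTable (PySem.Str.lower user_message) pvBranchTable

-- ===== PRECONDITION & SPEC =====
def Spec_suggest_branches_py (user_message : String) (out : List String) : Prop := out = suggest_branches_py_alt user_message
instance (user_message : String) (out : List String) : Decidable (Spec_suggest_branches_py user_message out) := by unfold Spec_suggest_branches_py; infer_instance

-- ===== CLAIM (what is proved, stated in full; the proofs are below) =====
def Claim_equal_suggest_branches_py : Prop := ∀ (user_message : String), Dom_suggest_branches_py user_message → Spec_suggest_branches_py user_message (suggest_branches_py user_message)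

-- ===== LEMMAS AND PROOFS =====

-- ===== VERDICT (by name: the statement is the Claim_ definition above) =====
theorem suggest_branches_py_spec : Claim_equal_suggest_branches_py := by
  intro s _
  unfold Spec_suggest_branches_py suggest_branches_py suggest_branches_py_alt pvBranchTable
  simp only [pvScanTable]
  generalize ((["work", "job", "boss", "office"]).any fun word => PySem.Str.isIn word (PySem.Str.lower s)) = c1
  generalize ((["relationship", "partner", "boyfriend", "girlfriend"]).any fun word => PySem.Str.isIn word (PySem.Str.lower s)) = c2
  generalize ((["anxious", "depressed", "stressed", "overwhelmed"]).any fun word => PySem.Str.isIn word (PySem.Str.lower s)) = c3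
  generalize ((["family", "parents", "mom", "dad", "sibling"]).any fun word => PySem.Str.isIn word (PySem.Str.lower s)) = c4
  cases c1 <;> cases c2 <;> cases c3 <;> cases c4 <;> simp [PySem.List.slice]
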